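-- pv_equiv track=rewrite | github.com/algorithm-studying/daily | 2022_01_21/1_python_조수빈.py | solution
-- ===== SOURCE A (Python) =====
-- def solution(price, money, count):
--     answer = -1
--     real_price = 0
--     for cnt in range(1,count+1):
--         real_price += price*cnt
--         if real_price>money:
--             answer = real_price-money
--         else:
--             answer=0
--     return answer
-- ===== SOURCE B (Python) =====
-- def solution(price, money, count):
--     # Closed form: rentals cost price*1 + ... + price*count = price*count*(count+1)/2.
--     # A's contract: -1 when there are no rental hours (count < 1), else the shortfall (0 if affordable).
--     if count < 1:
--         return -1
--     total = price * count * (count + 1) // 2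
--     return total - money if total > money else 0
-- ===== Notes on version B (the rewrite author's own statement) =====
-- stated objective: faster
-- what changed: Replaces the O(count) accumulation loop with the closed-form Gauss sum price*count*(count+1)//2 and a single comparison against money.
import Mathlib
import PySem

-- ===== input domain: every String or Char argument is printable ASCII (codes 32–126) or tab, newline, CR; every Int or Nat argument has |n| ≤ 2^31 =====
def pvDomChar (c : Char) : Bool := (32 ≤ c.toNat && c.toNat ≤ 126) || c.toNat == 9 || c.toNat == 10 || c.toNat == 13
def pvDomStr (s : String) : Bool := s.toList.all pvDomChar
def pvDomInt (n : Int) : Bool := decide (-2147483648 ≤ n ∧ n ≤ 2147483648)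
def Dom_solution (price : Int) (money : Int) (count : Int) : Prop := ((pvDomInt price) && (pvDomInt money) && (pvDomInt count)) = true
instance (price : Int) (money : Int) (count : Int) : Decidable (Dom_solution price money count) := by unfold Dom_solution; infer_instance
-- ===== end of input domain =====

-- B replaces A's O(count) accumulation loop with the closed-form Gauss sum (faster); same return value everywhere.

-- ===== PORT A =====
def solution (price : Int) (money : Int) (count : Int) : Int :=
  let s := (PySem.List.pyRange 1 (count + 1) 1).foldl
    (fun (st : Int × Int) cnt =>
      let real_price := st.2 + price * cnt
      if real_price > money then (real_price - money, real_price) else (0, real_price))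
    (-1, 0)
  s.1

-- ===== PORT B =====
def solution_alt (price : Int) (money : Int) (count : Int) : Int :=
  if count < 1 then -1
  else
    let total := PySem.Int.floordiv (price * count * (count + 1)) 2
    if total > money then total - money else 0

-- ===== PRECONDITION & SPEC =====
def Spec_solution (price : Int) (money : Int) (count : Int) (out : Int) : Prop := out = solution_alt price money count
instance (price : Int) (money : Int) (count : Int) (out : Int) : Decidable (Spec_solution price money count out) := by unfold Spec_solution; infer_instance

-- ===== CLAIM (what is proved, stated in full; the proofs are below) =====
def Claim_equal_solution : Prop := ∀ (price : Int) (money : Int) (count : Int), Dom_solution price money count → Spec_solution price money count (solution price money count)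

-- ===== LEMMAS AND PROOFS =====

-- the loop's final state over range(1, n+1), for n ≥ 1: (shortfall-or-0, price * Gauss n)
theorem solution_fold (price money : Int) (n : Nat) (hn : 1 ≤ n) :
    (PySem.List.pyRange 1 ((n : Int) + 1) 1).foldl
      (fun (st : Int × Int) cnt =>
        let real_price := st.2 + price * cnt
        if real_price > money then (real_price - money, real_price) else (0, real_price))
      (-1, 0)
    = (if price * ((n * (n + 1) / 2 : Nat) : Int) > money
        then price * ((n * (n + 1) / 2 : Nat) : Int) - money else 0,
       price * ((n * (n + 1) / 2 : Nat) : Int)) := by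
  induction n with
  | zero => omega
  | succ m ih =>
    rcases Nat.eq_or_lt_of_le hn with h1 | h1
    · -- m + 1 = 1
      have hm : m = 0 := by omega
      subst hm
      rw [show (((0+1 : Nat)) : Int) + 1 = 1 + 1 by norm_num, PySem.List.pyRange_one_singleton]
      norm_num
      split_ifs <;> rfl
    · -- 1 ≤ m, use ih and split off the last element
      have hm : 1 ≤ m := by omega
      have hsplit : PySem.List.pyRange 1 (((m + 1 : Nat) : Int) + 1) 1
          = PySem.List.pyRange 1 ((m : Int) + 1) 1 ++ [((m : Nat) : Int) + 1] := by
        have := PySem.List.pyRange_one_succ_right (a := 1) (b := (m : Int) + 1) (by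
          have : (1 : Int) ≤ (m : Int) := by exact_mod_cast hm
          omega)
        rw [← this]
        norm_num
      rw [hsplit, List.foldl_append, ih hm]
      have hg : ((m + 1) * (m + 1 + 1) / 2 : Nat) = (m * (m + 1) / 2 : Nat) + (m + 1) := by
        have h1 : (m + 1) * (m + 1 + 1) = m * (m + 1) + 2 * (m + 1) := by ring
        have h2 : 2 * (m * (m + 1) / 2) = m * (m + 1) := (Nat.even_mul_succ_self m).two_dvd.elim (fun k hk => by omega)
        omega
      simp only [List.foldl_cons, List.foldl_nil, hg]
      push_cast
      ring_nf
      split_ifs <;> rfl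

-- floor division by 2 of price*n*(n+1) is exactly price * Gauss n
theorem floordiv_gauss (price : Int) (n : Nat) :
    PySem.Int.floordiv (price * (n : Int) * ((n : Int) + 1)) 2
      = price * ((n * (n + 1) / 2 : Nat) : Int) := by
  have h2 : (n * (n + 1) : Nat) = 2 * (n * (n + 1) / 2) := by
    rcases (Nat.even_mul_succ_self n) with ⟨k, hk⟩
    omega
  have : price * (n : Int) * ((n : Int) + 1) = 2 * (price * ((n * (n + 1) / 2 : Nat) : Int)) := by
    have hcast : ((n : Int) * ((n : Int) + 1)) = 2 * ((n * (n + 1) / 2 : Nat) : Int) := by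
      exact_mod_cast congrArg (fun k : Nat => (k : Int)) h2
    calc price * (n : Int) * ((n : Int) + 1) = price * ((n : Int) * ((n : Int) + 1)) := by ring
      _ = price * (2 * ((n * (n + 1) / 2 : Nat) : Int)) := by rw [hcast]
      _ = 2 * (price * ((n * (n + 1) / 2 : Nat) : Int)) := by ring
  rw [this]
  simp [PySem.Int.floordiv, Int.mul_fdiv_cancel_left _ (by norm_num : (2:Int) ≠ 0)]

-- ===== VERDICT (by name: the statement is the Claim_ definition above) =====
theorem solution_spec : Claim_equal_solution := by
  intro price money count _
  unfold Spec_solution solution solution_alt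
  by_cases hc : count < 1
  · have : count + 1 ≤ 1 := by omega
    simp [PySem.List.pyRange_one_eq_nil this, hc]
  · obtain ⟨n, hn1, rfl⟩ : ∃ n : Nat, 1 ≤ n ∧ count = (n : Int) :=
      ⟨count.toNat, by omega, by omega⟩
    rw [solution_fold price money n hn1, floordiv_gauss price n,
      if_neg (show ¬ ((n : Int) < 1) by exact_mod_cast by omega)]
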